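-- pv_equiv track=rewrite | github.com/neimasilk/volcarch-repo | experiments/E027_ml_substrate_detection/03_expansion_validation.py | has_reduplication
-- ===== SOURCE A (Python) =====
-- def has_reduplication(form):
--     if "-" in form:
--         return 1
--     fl = form.lower()
--     for plen in (2, 3):
--         for i in range(len(fl) - plen * 2 + 1):
--             chunk = fl[i:i+plen]
--             if chunk == fl[i+plen:i+plen*2]:
--                 return 1
--     return 0
-- ===== SOURCE B (Python) =====
-- def has_reduplication(form):
--     # Run-length scan of the self-overlap match sequence: an adjacent repeat of
--     # length `shift` is exactly a run of `shift` consecutive positions where the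
--     # string agrees with itself shifted by `shift` (a period-`shift` window of
--     # length 2*shift). No substrings are built or compared.
--     if "-" in form:
--         return 1
--     t = form.lower()
--     for shift in (2, 3):
--         run = 0
--         for a, b in zip(t, t[shift:]):
--             run = run + 1 if a == b else 0
--             if run == shift:
--                 return 1
--     return 0
-- ===== Notes on version B (the rewrite author's own statement) =====
-- stated objective: alternative
-- what changed: Instead of extracting and comparing candidate 2- and 3-char slices at every offset, B scans the self-overlap match sequence: it zips the lowered string with itself shifted by 2 and by 3 and keeps a run-length counter of consecutive matching positions; a run reaching the shift length is exactly a period-shift window of length 2*shift, i.e. an adjacent repeat.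
import Mathlib
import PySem

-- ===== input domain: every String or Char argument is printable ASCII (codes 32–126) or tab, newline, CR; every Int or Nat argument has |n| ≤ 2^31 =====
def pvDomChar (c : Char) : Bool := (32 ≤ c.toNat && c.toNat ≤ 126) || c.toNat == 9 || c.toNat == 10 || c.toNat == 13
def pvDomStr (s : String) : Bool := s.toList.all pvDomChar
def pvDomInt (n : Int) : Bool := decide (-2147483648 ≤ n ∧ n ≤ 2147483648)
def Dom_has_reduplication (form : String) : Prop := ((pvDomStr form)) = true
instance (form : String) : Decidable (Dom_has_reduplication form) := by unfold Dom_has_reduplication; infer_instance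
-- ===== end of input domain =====

-- B replaces A's per-offset slice extraction/comparison by a run-length scan of the
-- self-overlap match sequence (zip of the string with itself shifted); objective: alternative.

-- ===== PORT A =====
-- if "-" in form: return 1; fl = form.lower();
-- for plen in (2,3): for i in range(len(fl)-plen*2+1): if fl[i:i+plen]==fl[i+plen:i+plen*2]: return 1; return 0
-- (the early 'return 1' of the double loop is List.any over the same ranges, in the same order)
def has_reduplication (form : String) : Int :=
  if PySem.Str.isIn "-" form then 1
  else
    if ([2, 3] : List Int).any (fun plen =>
        (PySem.List.pyRange 0 (((PySem.Str.lower form).toList.length : Int) - plen * 2 + 1) 1).any (fun i =>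
          PySem.List.slice (PySem.Str.lower form).toList (some i) (some (i + plen)) ==
            PySem.List.slice (PySem.Str.lower form).toList (some (i + plen)) (some (i + plen * 2))))
    then 1 else 0

-- ===== PORT B =====
-- inner loop of Source B: 'run = 0; for a, b in zip(t, t[shift:]): run = run+1 if a==b else 0;
-- if run == shift: return 1' — structural recursion over the zipped pairs with the run accumulator
def bLoop (shift : Int) : List (Char × Char) → Int → Bool
  | [], _ => false
  | ab :: rest, run =>
    let run' := if ab.1 == ab.2 then run + 1 else 0
    if run' == shift then true else bLoop shift rest run'

-- if "-" in form: return 1; t = form.lower();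
-- for shift in (2,3): <inner loop above>; return 0
def has_reduplication_alt (form : String) : Int :=
  if PySem.Str.isIn "-" form then 1
  else
    if ([2, 3] : List Int).any (fun shift =>
        bLoop shift
          ((PySem.Str.lower form).toList.zip
            (PySem.List.slice (PySem.Str.lower form).toList (some shift) none)) 0)
    then 1 else 0

-- ===== PRECONDITION & SPEC =====
def Spec_has_reduplication (form : String) (out : Int) : Prop := out = has_reduplication_alt form
instance (form : String) (out : Int) : Decidable (Spec_has_reduplication form out) := by unfold Spec_has_reduplication; infer_instance

-- ===== CLAIM (what is proved, stated in full; the proofs are below) =====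
def Claim_equal_has_reduplication : Prop := ∀ (form : String), Dom_has_reduplication form → Spec_has_reduplication form (has_reduplication form)

-- ===== LEMMAS AND PROOFS =====

def pairsEq (l : List (Char × Char)) : Bool := l.all (fun ab => ab.1 == ab.2)

theorem pairsEq_take_of_take {l : List (Char × Char)} {m n : Nat} (hmn : m ≤ n)
    (h : pairsEq (l.take n) = true) : pairsEq (l.take m) = true := by
  have hmt : l.take m = (l.take n).take m := by rw [List.take_take, Nat.min_eq_left hmn]
  rw [hmt]
  unfold pairsEq at *
  rw [List.all_eq_true] at *
  exact fun x hx => h x (List.take_subset m _ hx)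

-- invariant of the run-length loop: with counter r it succeeds iff the current run
-- completes to length p right away, or a fresh full-p run of matches occurs later
theorem pairsEq_cons (ab : Char × Char) (u : List (Char × Char)) :
    pairsEq (ab :: u) = ((ab.1 == ab.2) && pairsEq u) := rfl

theorem bLoop_char (p : Nat) (l : List (Char × Char)) :
    ∀ (r : Nat), r < p →
    (bLoop (p : Int) l (r : Int) = true ↔
      ((p - r) ≤ l.length ∧ pairsEq (l.take (p - r)) = true) ∨
      ∃ j, 1 ≤ j ∧ j + p ≤ l.length ∧ pairsEq ((l.drop j).take p) = true) := by
  induction l with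
  | nil =>
    intro r hr
    constructor
    · intro h; simp [bLoop] at h
    · rintro (⟨h1, _⟩ | ⟨j, hj, h1, _⟩) <;> simp only [List.length_nil] at h1 <;> omega
  | cons ab rest ih =>
    intro r hr
    by_cases hab : ab.1 = ab.2
    · by_cases hrp : r + 1 = p
      · -- the run completes at this element
        have hpq : (((r : Int) + 1) == (p : Int)) = true := by
          simp only [beq_iff_eq]; omega
        have hl : bLoop (p : Int) (ab :: rest) (r : Int) = true := by
          simp [bLoop, hab, hpq]
        rw [hl]
        constructor
        · intro _
          left
          refine ⟨by simp only [List.length_cons]; omega, ?_⟩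
          rw [show p - r = 1 by omega]
          simp [pairsEq, hab]
        · intro _; rfl
      · -- match, run continues
        have hlt : r + 1 < p := by omega
        have hstep : bLoop (p : Int) (ab :: rest) (r : Int)
            = bLoop (p : Int) rest ((r + 1 : Nat) : Int) := by
          simp only [bLoop, if_pos (beq_iff_eq.mpr hab)]
          rw [if_neg (by simp only [beq_iff_eq]; omega)]
          norm_num
        rw [hstep, ih (r + 1) hlt]
        have htake : (ab :: rest).take (p - r) = ab :: rest.take (p - (r + 1)) := by
          rw [show p - r = (p - (r + 1)) + 1 by omega, List.take_succ_cons]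
        constructor
        · rintro (⟨h1, h2⟩ | ⟨j, hj, h1, h2⟩)
          · left
            refine ⟨by simp only [List.length_cons]; omega, ?_⟩
            rw [htake, pairsEq_cons]
            simp [hab, h2]
          · right
            refine ⟨j + 1, by omega, by simp only [List.length_cons]; omega, ?_⟩
            rw [List.drop_succ_cons]
            exact h2
        · rintro (⟨h1, h2⟩ | ⟨j, hj, h1, h2⟩)
          · left
            simp only [List.length_cons] at h1
            refine ⟨by omega, ?_⟩
            rw [htake, pairsEq_cons] at h2
            simp only [beq_iff_eq.mpr hab, Bool.true_and] at h2
            exact h2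
          · simp only [List.length_cons] at h1
            rcases Nat.exists_eq_add_of_le hj with ⟨j', rfl⟩
            rw [show 1 + j' = j' + 1 by omega, List.drop_succ_cons] at h2
            rcases Nat.lt_or_ge j' 1 with hj'0 | hj'1
            · -- a full-p window at the head of rest absorbs into the running credit
              interval_cases j'
              simp only [List.drop_zero] at h2
              exact Or.inl ⟨by omega, pairsEq_take_of_take (by omega) h2⟩
            · exact Or.inr ⟨j', hj'1, by omega, h2⟩
    · -- mismatch: the counter resets to 0
      have hstep : bLoop (p : Int) (ab :: rest) (r : Int)
          = bLoop (p : Int) rest ((0 : Nat) : Int) := by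
        have h0p : ¬ (((0 : Int)) == (p : Int)) = true := by
          simp only [beq_iff_eq]; omega
        simp [bLoop, hab, h0p]
      rw [hstep, ih 0 (by omega)]
      constructor
      · rintro (⟨h1, h2⟩ | ⟨j, hj, h1, h2⟩)
        · -- the full-p window at the head of rest is a window of (ab :: rest) at offset 1
          right
          refine ⟨1, le_refl 1, by simp only [List.length_cons]; omega, ?_⟩
          rw [List.drop_succ_cons, List.drop_zero]
          simpa [Nat.sub_zero] using h2
        · right
          refine ⟨j + 1, by omega, by simp only [List.length_cons]; omega, ?_⟩
          rw [List.drop_succ_cons]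
          exact h2
      · rintro (⟨h1, h2⟩ | ⟨j, hj, h1, h2⟩)
        · -- impossible: the head pair mismatches but lies inside the credited prefix
          exfalso
          have hone : pairsEq ((ab :: rest).take 1) = true :=
            pairsEq_take_of_take (by omega) h2
          simp [pairsEq, hab] at hone
        · simp only [List.length_cons] at h1
          rcases Nat.exists_eq_add_of_le hj with ⟨j', rfl⟩
          rw [show 1 + j' = j' + 1 by omega, List.drop_succ_cons] at h2
          rcases Nat.lt_or_ge j' 1 with hj'0 | hj'1
          · interval_cases j'
            simp only [List.drop_zero] at h2
            exact Or.inl ⟨by omega, by simpa [Nat.sub_zero] using h2⟩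
          · exact Or.inr ⟨j', hj'1, by omega, h2⟩

theorem bLoop_zero (p : Nat) (hp : 1 ≤ p) (l : List (Char × Char)) :
    (bLoop (p : Int) l 0 = true ↔
      ∃ j, j + p ≤ l.length ∧ pairsEq ((l.drop j).take p) = true) := by
  have h := bLoop_char p l 0 hp
  rw [show ((0 : Nat) : Int) = 0 by simp] at h
  rw [h]
  constructor
  · rintro (⟨h1, h2⟩ | ⟨j, _, h1, h2⟩)
    · exact ⟨0, by simpa using h1, by simpa using h2⟩
    · exact ⟨j, h1, h2⟩
  · rintro ⟨j, h1, h2⟩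
    rcases Nat.lt_or_ge j 1 with hj | hj
    · interval_cases j
      left
      exact ⟨by simpa using h1, by simpa using h2⟩
    · right
      exact ⟨j, hj, h1, h2⟩

theorem zip_take_eq (u v : List Char) (n : Nat) :
    (u.zip v).take n = (u.take n).zip (v.take n) := by
  induction u generalizing v n with
  | nil => simp
  | cons a u ih =>
    cases v with
    | nil => simp
    | cons b v =>
      cases n with
      | zero => simp
      | succ n => simp [ih]

theorem zip_drop_eq (u v : List Char) (n : Nat) :
    (u.zip v).drop n = (u.drop n).zip (v.drop n) := by
  induction u generalizing v n with
  | nil => simp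
  | cons a u ih =>
    cases v with
    | nil => simp
    | cons b v =>
      cases n with
      | zero => simp
      | succ n => simp [ih]

theorem pairsEq_zip (u v : List Char) (h : u.length = v.length) :
    (pairsEq (u.zip v) = true ↔ u = v) := by
  induction u generalizing v with
  | nil => cases v with
    | nil => simp [pairsEq]
    | cons b v => simp at h
  | cons a u ih =>
    cases v with
    | nil => simp at h
    | cons b v =>
      simp only [List.zip_cons_cons, pairsEq, List.all_cons, Bool.and_eq_true, beq_iff_eq,
        List.cons.injEq]
      rw [show (List.all (u.zip v) fun ab => ab.1 == ab.2) = pairsEq (u.zip v) from rfl,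
        ih v (by simpa using h)]

-- for one pattern length p, A's slice loop finds a repeat iff B's run-length loop does
theorem per_p (t : List Char) (p : Nat) (hp : 1 ≤ p) :
    ((PySem.List.pyRange 0 ((t.length : Int) - (p : Int) * 2 + 1) 1).any (fun i =>
        PySem.List.slice t (some i) (some (i + (p : Int))) ==
          PySem.List.slice t (some (i + (p : Int))) (some (i + (p : Int) * 2))))
    = bLoop (p : Int) (t.zip (t.drop p)) 0 := by
  apply Bool.coe_iff_coe.mp
  rw [bLoop_zero p hp]
  simp only [List.any_eq_true, PySem.List.mem_pyRange_one, beq_iff_eq]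
  constructor
  · rintro ⟨i, ⟨h0, h1⟩, hs⟩
    obtain ⟨j, rfl⟩ : ∃ j : Nat, i = (j : Int) := ⟨i.toNat, by omega⟩
    have hj : j + 2 * p ≤ t.length := by omega
    refine ⟨j, ?_, ?_⟩
    · simp only [List.length_zip, List.length_drop]; omega
    · rw [show ((j : Int) + (p : Int)) = ((j + p : Nat) : Int) by push_cast; ring,
          show ((j : Int) + (p : Int) * 2) = ((j + p + p : Nat) : Int) by push_cast; ring,
          PySem.List.slice_natCast, PySem.List.slice_natCast] at hs
      rw [show j + p - j = p by omega, show j + p + p - (j + p) = p by omega] at hs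
      rw [zip_drop_eq, zip_take_eq, List.drop_drop]
      rw [show p + j = j + p by omega]
      rw [pairsEq_zip _ _ (by simp; omega)]
      exact hs
  · rintro ⟨j, hlen, hpe⟩
    simp only [List.length_zip, List.length_drop] at hlen
    have hj : j + 2 * p ≤ t.length := by omega
    rw [zip_drop_eq, zip_take_eq, List.drop_drop, show p + j = j + p by omega,
        pairsEq_zip _ _ (by simp; omega)] at hpe
    refine ⟨(j : Int), ⟨by omega, by omega⟩, ?_⟩
    rw [show ((j : Int) + (p : Int)) = ((j + p : Nat) : Int) by push_cast; ring,
        show ((j : Int) + (p : Int) * 2) = ((j + p + p : Nat) : Int) by push_cast; ring,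
        PySem.List.slice_natCast, PySem.List.slice_natCast,
        show j + p - j = p by omega, show j + p + p - (j + p) = p by omega]
    exact hpe

-- the two loop conditions agree
theorem pv_core (t : List Char) :
    (([2, 3] : List Int).any (fun plen =>
        (PySem.List.pyRange 0 ((t.length : Int) - plen * 2 + 1) 1).any (fun i =>
          PySem.List.slice t (some i) (some (i + plen)) ==
            PySem.List.slice t (some (i + plen)) (some (i + plen * 2)))))
    = (([2, 3] : List Int).any (fun shift =>
        bLoop shift (t.zip (PySem.List.slice t (some shift) none)) 0)) := by
  have h2 : PySem.List.slice t (some (2 : Int)) none = t.drop 2 := by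
    rw [show (2 : Int) = ((2 : Nat) : Int) by norm_num, PySem.List.slice_from_natCast]
  have h3 : PySem.List.slice t (some (3 : Int)) none = t.drop 3 := by
    rw [show (3 : Int) = ((3 : Nat) : Int) by norm_num, PySem.List.slice_from_natCast]
  simp only [List.any_cons, List.any_nil, Bool.or_false, h2, h3]
  have e2 := per_p t 2 (by omega)
  have e3 := per_p t 3 (by omega)
  norm_num at e2 e3 ⊢
  rw [e2, e3]

-- ===== VERDICT (by name: the statement is the Claim_ definition above) =====
theorem has_reduplication_spec : Claim_equal_has_reduplication := by
  intro form _
  unfold Spec_has_reduplication has_reduplication has_reduplication_alt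
  by_cases hin : PySem.Str.isIn "-" form = true
  · rw [if_pos hin, if_pos hin]
  · rw [if_neg hin, if_neg hin, pv_core]
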